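-- pv_equiv track=rewrite | github.com/maxrodrigo/advent-of-code | day-01/solution.py | fuel_total
-- ===== SOURCE A (Python) =====
-- def fuel_total(m):
--     """ Calculates recursively the amount of fuel needed for the given mass. """
--     total = 0
--
--     while True:
--         m = fuel(m)
--         if m > 0:
--             total += m
--         else:
--             break
--
--     return total
--
-- def fuel(m):
--     """ Calculates the amount of fuel needed for the given mass. """
--     return m // 3 - 2
-- ===== SOURCE B (Python) =====
-- def fuel_total(m):
--     """ Calculates recursively the amount of fuel needed for the given mass. """
--     f = fuel(m)
--     return f + fuel_total(f) if f > 0 else 0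
--
-- def fuel(m):
--     """ Calculates the amount of fuel needed for the given mass. """
--     return m // 3 - 2
-- ===== Notes on version B (the rewrite author's own statement) =====
-- stated objective: simpler
-- what changed: Replaced the while-loop with a running total by direct recursion on the fuel value (f + fuel_total(f)), matching the docstring's 'recursively'.
import Mathlib
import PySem

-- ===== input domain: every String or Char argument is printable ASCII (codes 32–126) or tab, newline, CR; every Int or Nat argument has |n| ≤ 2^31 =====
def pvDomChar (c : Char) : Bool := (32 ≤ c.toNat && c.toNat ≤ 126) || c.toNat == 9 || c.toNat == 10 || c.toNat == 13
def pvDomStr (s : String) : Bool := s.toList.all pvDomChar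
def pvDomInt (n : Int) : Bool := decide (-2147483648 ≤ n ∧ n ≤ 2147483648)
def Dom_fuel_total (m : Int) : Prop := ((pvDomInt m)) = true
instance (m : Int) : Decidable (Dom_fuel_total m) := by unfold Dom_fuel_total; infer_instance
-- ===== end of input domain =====

-- B replaces A's while-loop with a running total by a direct recursion f + fuel_total(f); objective: simpler.

-- termination fact shared by both ports: a positive fuel value is smaller than the mass
theorem pv_fuel_lt (m : Int) (h : 0 < PySem.Int.floordiv m 3 - 2) :
    (PySem.Int.floordiv m 3 - 2).toNat < m.toNat := by
  have h3 : PySem.Int.floordiv m 3 = m / 3 := PySem.Int.floordiv_eq_ediv_of_pos (by omega)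
  rw [h3] at h ⊢
  omega

-- ===== PORT A =====
def fuel (m : Int) : Int := PySem.Int.floordiv m 3 - 2

-- A's `while True` loop over the mutable state (m, total)
def fuel_total_loop (m total : Int) : Int :=
  let m' := fuel m
  if _h : m' > 0 then fuel_total_loop m' (total + m') else total
termination_by m.toNat
decreasing_by exact pv_fuel_lt m _h

def fuel_total (m : Int) : Int := fuel_total_loop m 0

-- ===== PORT B =====
def fuel_total_alt (m : Int) : Int :=
  let f := PySem.Int.floordiv m 3 - 2
  if _h : f > 0 then f + fuel_total_alt f else 0
termination_by m.toNat
decreasing_by exact pv_fuel_lt m _h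

-- ===== PRECONDITION & SPEC =====
def Spec_fuel_total (m : Int) (out : Int) : Prop := out = fuel_total_alt m
instance (m : Int) (out : Int) : Decidable (Spec_fuel_total m out) := by unfold Spec_fuel_total; infer_instance

-- ===== CLAIM (what is proved, stated in full; the proofs are below) =====
def Claim_equal_fuel_total : Prop := ∀ (m : Int), Dom_fuel_total m → Spec_fuel_total m (fuel_total m)

-- ===== LEMMAS AND PROOFS =====
theorem loop_eq (m : Int) : ∀ total, fuel_total_loop m total = total + fuel_total_alt m := by
  induction m using fuel_total_alt.induct with
  | case1 m f hf ih =>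
    intro total
    rw [fuel_total_loop, fuel_total_alt]
    simp only [fuel]
    rw [dif_pos hf, dif_pos hf, ih]
    ring
  | case2 m f hf =>
    intro total
    rw [fuel_total_loop, fuel_total_alt]
    simp only [fuel]
    rw [dif_neg hf, dif_neg hf]
    ring

-- ===== VERDICT (by name: the statement is the Claim_ definition above) =====
theorem fuel_total_spec : Claim_equal_fuel_total := by
  intro m _
  unfold Spec_fuel_total fuel_total
  rw [loop_eq]
  ring
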